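-- pv_equiv track=rewrite | github.com/quantifylabs/aegis-memory | server/observability.py | _normalize_path
-- ===== SOURCE A (Python) =====
-- def _normalize_path(path: str) -> str:
--     parts = path.split("/")
--     normalized = []
--     for part in parts:
--         if len(part) == 32 and all(c in "0123456789abcdef" for c in part):
--             normalized.append("{id}")
--         else:
--             normalized.append(part)
--     return "/".join(normalized)
-- ===== SOURCE B (Python) =====
-- import re
--
-- _ID_SEGMENT = re.compile(r'(?:(?<=/)|\A)[0-9a-f]{32}(?=/|\Z)')
--
-- def _normalize_path(path: str) -> str:
--     return _ID_SEGMENT.sub('{id}', path)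
-- ===== Notes on version B (the rewrite author's own statement) =====
-- stated objective: idiomatic
-- what changed: A splits the path on slashes, loops over the parts appending a placeholder for 32-char lowercase-hex parts, and rejoins; B does the same whole-segment replacement with one precompiled regex substitution (hex class anchored to segment boundaries by a lookbehind/lookahead) in a single scan.
import Mathlib
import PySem

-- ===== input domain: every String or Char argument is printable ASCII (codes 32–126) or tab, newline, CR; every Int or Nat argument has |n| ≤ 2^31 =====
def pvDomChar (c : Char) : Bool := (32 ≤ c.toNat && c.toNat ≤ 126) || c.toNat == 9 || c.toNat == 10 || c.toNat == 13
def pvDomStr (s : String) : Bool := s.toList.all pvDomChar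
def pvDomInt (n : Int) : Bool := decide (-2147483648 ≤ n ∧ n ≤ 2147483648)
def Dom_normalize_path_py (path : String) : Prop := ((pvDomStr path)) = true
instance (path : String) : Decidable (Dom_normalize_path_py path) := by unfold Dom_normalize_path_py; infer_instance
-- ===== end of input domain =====

-- B replaces A's split/per-part loop/join with a single regex substitution (one left-to-right scan); same values, more idiomatic.

-- ===== PORT A =====
-- parts = path.split("/"); loop appending "{id}" for parts of length 32 whose chars are all in "0123456789abcdef"; "/".join
def normalize_path_py (path : String) : String :=
  String.ofList (PySem.Chars.join ['/']
    ((PySem.Chars.splitOn path.toList ['/']).map (fun part =>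
      if PySem.Chars.len part == 32 && part.all (fun c => PySem.Chars.isIn [c] "0123456789abcdef".toList)
      then "{id}".toList else part)))

-- ===== PORT B =====
-- Hand port of re.sub(r'(?:(?<=/)|\A)[0-9a-f]{32}(?=/|\Z)', '{id}', path): PySem has no regex, so the
-- engine's scan for THIS fixed pattern is transcribed step for step and is exact on all inputs: walk
-- the string left to right keeping the one bit of state the pattern reads (are we at \A or just after
-- a '/'); where the pattern matches, emit '{id}' and resume after the 32 consumed chars; otherwise
-- copy one char and advance.
def pvHexLower (c : Char) : Bool :=  -- the character class [0-9a-f]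
  (decide ('0' ≤ c) && decide (c ≤ '9')) || (decide ('a' ≤ c) && decide (c ≤ 'f'))

def pvMatchHere (l : List Char) : Bool :=  -- does [0-9a-f]{32}(?=/|\Z) match at the head of l?
  (l.take 32).length == 32 && (l.take 32).all pvHexLower &&
  (match l.drop 32 with | [] => true | d :: _ => d == '/')

def pvReSub (atStart : Bool) (l : List Char) : List Char :=
  match l with
  | [] => []
  | c :: rest =>
    if atStart && pvMatchHere (c :: rest) then
      '{' :: 'i' :: 'd' :: '}' :: pvReSub false ((c :: rest).drop 32)
    else c :: pvReSub (c == '/') rest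
termination_by l.length
decreasing_by all_goals simp

def normalize_path_py_alt (path : String) : String :=
  String.ofList (pvReSub true path.toList)

-- ===== PRECONDITION & SPEC =====
def Spec_normalize_path_py (path : String) (out : String) : Prop := out = normalize_path_py_alt path
instance (path : String) (out : String) : Decidable (Spec_normalize_path_py path out) := by unfold Spec_normalize_path_py; infer_instance

-- ===== CLAIM (what is proved, stated in full; the proofs are below) =====
def Claim_equal_normalize_path_py : Prop := ∀ (path : String), Dom_normalize_path_py path → Spec_normalize_path_py path (normalize_path_py path)

-- ===== LEMMAS AND PROOFS =====

-- the list of '/'-separated segments of l: the common view both ports are reduced to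
def pvPieces (l : List Char) : List (List Char) :=
  match h : l.dropWhile (· ≠ '/') with
  | [] => [l]
  | _ :: r => (l.takeWhile (· ≠ '/')) :: pvPieces r
termination_by l.length
decreasing_by
  have h1 := List.length_dropWhile_le (p := (· ≠ '/')) (l := l)
  rw [h] at h1; simp at h1; omega

def pvConsHead (p : List Char) (ps : List (List Char)) : List (List Char) :=
  match ps with | [] => [p] | q :: qs => (p ++ q) :: qs

-- A's per-part normalization with the hex test rewritten through pv_hexchar
def pvNorm (p : List Char) : List Char :=
  if p.length == 32 && p.all pvHexLower then "{id}".toList else p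

theorem pvPieces_ne_nil (l : List Char) : pvPieces l ≠ [] := by
  rw [pvPieces]; split <;> simp

theorem pvPieces_nil : pvPieces [] = [[]] := by rw [pvPieces]; rfl

theorem pvPieces_of_dropWhile_nil (l : List Char) (h : l.dropWhile (· ≠ '/') = []) :
    pvPieces l = [l] := by
  rw [pvPieces]
  split
  · rfl
  · rename_i a r heq
    have heq' : l.dropWhile (· ≠ '/') = a :: r := heq
    rw [h] at heq'; cases heq'

theorem pvPieces_of_dropWhile_cons (l r : List Char) (a : Char)
    (h : l.dropWhile (· ≠ '/') = a :: r) :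
    pvPieces l = (l.takeWhile (· ≠ '/')) :: pvPieces r := by
  rw [pvPieces]
  split
  · rename_i heq
    have heq' : l.dropWhile (· ≠ '/') = [] := heq
    rw [h] at heq'; cases heq'
  · rename_i b r' heq
    have heq' : l.dropWhile (· ≠ '/') = b :: r' := heq
    rw [h] at heq'
    cases heq'
    rfl

theorem pv_dropWhile_head (l r : List Char) (a : Char)
    (h : l.dropWhile (· ≠ '/') = a :: r) : a = '/' := by
  have := List.head?_dropWhile_not (p := fun c : Char => decide (c ≠ '/')) (l := l)
  rw [h] at this
  simp at this
  exact this

theorem pvPieces_slash (rest : List Char) : pvPieces ('/' :: rest) = [] :: pvPieces rest := by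
  rw [pvPieces_of_dropWhile_cons ('/' :: rest) rest '/' (by simp)]
  simp

theorem pvPieces_cons_ne (c : Char) (rest : List Char) (hc : c ≠ '/') :
    pvPieces (c :: rest) = pvConsHead [c] (pvPieces rest) := by
  rcases hdw : rest.dropWhile (· ≠ '/') with _ | ⟨a, r⟩
  · rw [pvPieces_of_dropWhile_nil (c :: rest) (by rw [List.dropWhile_cons, if_pos (by simp [hc])]; exact hdw),
        pvPieces_of_dropWhile_nil rest hdw]
    simp [pvConsHead]
  · rw [pvPieces_of_dropWhile_cons (c :: rest) r a (by rw [List.dropWhile_cons, if_pos (by simp [hc])]; exact hdw),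
        pvPieces_of_dropWhile_cons rest r a hdw]
    simp [pvConsHead, hc]

theorem pvConsHead_consHead (p c : List Char) (ps : List (List Char)) :
    pvConsHead p (pvConsHead c ps) = pvConsHead (p ++ c) ps := by
  cases ps <;> simp [pvConsHead]

-- one-step equations of PySem's fuel-based splitter at sep = "/"
theorem pv_go_nil (fuel : Nat) (cur : List Char) (acc : List (List Char)) :
    PySem.Chars.splitOn.go ['/'] fuel [] cur acc = (cur.reverse :: acc).reverse := by
  cases fuel <;> rw [PySem.Chars.splitOn.go] <;> simp

theorem pv_go_cons_slash (fuel : Nat) (rest cur : List Char) (acc : List (List Char)) :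
    PySem.Chars.splitOn.go ['/'] (fuel + 1) ('/' :: rest) cur acc
      = PySem.Chars.splitOn.go ['/'] fuel rest [] (cur.reverse :: acc) := by
  rw [PySem.Chars.splitOn.go]
  simp [List.isPrefixOf]

theorem pv_go_cons_ne (fuel : Nat) (c : Char) (rest cur : List Char) (acc : List (List Char))
    (h : c ≠ '/') :
    PySem.Chars.splitOn.go ['/'] (fuel + 1) (c :: rest) cur acc
      = PySem.Chars.splitOn.go ['/'] fuel rest (c :: cur) acc := by
  rw [PySem.Chars.splitOn.go]
  simp [List.isPrefixOf, Ne.symm h]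

-- the fuel-based PySem splitter computes pvPieces
theorem pv_go_split (fuel : Nat) : ∀ (l cur : List Char) (acc : List (List Char)),
    l.length ≤ fuel →
    PySem.Chars.splitOn.go ['/'] fuel l cur acc = acc.reverse ++ pvConsHead cur.reverse (pvPieces l) := by
  induction fuel with
  | zero =>
    intro l cur acc hl
    have : l = [] := by cases l <;> simp_all
    subst this
    rw [pv_go_nil, pvPieces_nil]
    simp [pvConsHead]
  | succ n ih =>
    intro l cur acc hl
    cases l with
    | nil =>
      rw [pv_go_nil, pvPieces_nil]
      simp [pvConsHead]
    | cons c rest =>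
      by_cases hc : c = '/'
      · subst hc
        rw [pv_go_cons_slash, ih rest [] (cur.reverse :: acc) (by simp at hl ⊢; omega)]
        rcases hq : pvPieces rest with _ | ⟨q, qs⟩
        · exact absurd hq (pvPieces_ne_nil rest)
        · simp [pvPieces_slash, hq, pvConsHead]
      · rw [pv_go_cons_ne n c rest cur acc hc, ih rest (c :: cur) acc (by simp at hl ⊢; omega)]
        rw [pvPieces_cons_ne c rest hc, pvConsHead_consHead]
        simp

theorem pv_splitOn_eq_pieces (l : List Char) : PySem.Chars.splitOn l ['/'] = pvPieces l := by
  unfold PySem.Chars.splitOn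
  rw [pv_go_split (l.length + 1) l [] [] (by omega)]
  rcases hq : pvPieces l with _ | ⟨q, qs⟩
  · exact absurd hq (pvPieces_ne_nil l)
  · simp [pvConsHead]

-- A's membership test in "0123456789abcdef" is B's character class [0-9a-f]
theorem pv_hexchar (c : Char) :
    PySem.Chars.isIn [c] "0123456789abcdef".toList = pvHexLower c := by
  rw [Bool.eq_iff_iff, PySem.Chars.isIn_iff_infix, List.singleton_infix_iff]
  show c ∈ ['0','1','2','3','4','5','6','7','8','9','a','b','c','d','e','f'] ↔ _
  unfold pvHexLower
  simp only [List.mem_cons, List.not_mem_nil, or_false, Bool.or_eq_true, Bool.and_eq_true,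
    decide_eq_true_eq, Char.le_def, UInt32.le_iff_toNat_le]
  constructor
  · rintro (rfl|rfl|rfl|rfl|rfl|rfl|rfl|rfl|rfl|rfl|rfl|rfl|rfl|rfl|rfl|rfl) <;> decide
  · intro h
    have hc := Char.ofNat_toNat c
    have hn : (48 ≤ c.toNat ∧ c.toNat ≤ 57) ∨ (97 ≤ c.toNat ∧ c.toNat ≤ 102) := h
    have hub : c.toNat ≤ 102 := by omega
    have hlb : 48 ≤ c.toNat := by omega
    interval_cases hx : c.toNat <;> (try omega) <;> (rw [← hc]; decide)

-- one-step equations of the scanner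
theorem pvReSub_true_match (l : List Char) (hne : l ≠ []) (hm : pvMatchHere l = true) :
    pvReSub true l = '{' :: 'i' :: 'd' :: '}' :: pvReSub false (l.drop 32) := by
  rcases l with _ | ⟨c, rest⟩
  · cases hne rfl
  · rw [pvReSub, if_pos (by simp [hm])]

theorem pvReSub_true_nomatch (c : Char) (rest : List Char) (hm : pvMatchHere (c :: rest) = false) :
    pvReSub true (c :: rest) = c :: pvReSub (c == '/') rest := by
  rw [pvReSub, if_neg (by simp [hm])]

theorem pvReSub_false_cons (c : Char) (rest : List Char) :
    pvReSub false (c :: rest) = c :: pvReSub (c == '/') rest := by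
  rw [pvReSub, if_neg (by simp)]

-- the scanner copies a slash-free block verbatim when not at a segment start
theorem pv_copy (seg : List Char) (h : ∀ c ∈ seg, c ≠ '/') (d : List Char) :
    pvReSub false (seg ++ d) = seg ++ pvReSub false d := by
  induction seg with
  | nil => simp
  | cons c seg' ih =>
    rw [List.cons_append, pvReSub_false_cons]
    have hc : c ≠ '/' := h c (by simp)
    rw [show (c == '/') = false by simp [hc], ih (fun x hx => h x (by simp [hx]))]
    simp

-- the pattern matches at a segment start iff the whole segment is 32 lowercase-hex chars
theorem pv_match_iff (seg d : List Char) (h : ∀ c ∈ seg, c ≠ '/')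
    (hd : d = [] ∨ ∃ r, d = '/' :: r) :
    pvMatchHere (seg ++ d) = (seg.length == 32 && seg.all pvHexLower) := by
  unfold pvMatchHere
  by_cases h32 : seg.length = 32
  · have htake : (seg ++ d).take 32 = seg := by
      rw [← h32, List.take_left]
    have hdrop : (seg ++ d).drop 32 = d := by
      rw [← h32, List.drop_left]
    rw [htake, hdrop]
    rcases hd with rfl | ⟨r, rfl⟩ <;> simp [h32]
  · by_cases hlt : seg.length < 32
    · rcases hd with rfl | ⟨r, rfl⟩
      · have hle : seg.length ≤ 32 := by omega
        rw [List.append_nil, List.take_of_length_le hle, List.drop_eq_nil_of_le hle]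
        simp
      · have htake : (seg ++ '/' :: r).take 32 = seg ++ ('/' :: r).take (32 - seg.length) := by
          rw [List.take_append, List.take_of_length_le (by omega)]
        have h1 : ('/' :: r).take (32 - seg.length) = '/' :: r.take (31 - seg.length) := by
          have h2 : 32 - seg.length = (31 - seg.length) + 1 := by omega
          rw [h2]; rfl
        rw [htake, h1]
        have hall : ((seg ++ '/' :: r.take (31 - seg.length)).all pvHexLower) = false := by
          rw [List.all_append, List.all_cons, show pvHexLower '/' = false from by decide]
          simp
        rw [hall]
        simp
        exact fun h' => absurd h' h32
    · -- segment longer than 32 chars: the char after the first 32 is not '/', the boundary fails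
      have hgt : 32 < seg.length := by omega
      have hdrop : (seg ++ d).drop 32 = seg.drop 32 ++ d := by
        rw [List.drop_append]
        simp [show 32 - seg.length = 0 by omega]
      rcases hds : seg.drop 32 with _ | ⟨a, t⟩
      · have := congrArg List.length hds
        simp at this
        omega
      · have ha : a ≠ '/' := h a (List.mem_of_mem_drop (by rw [hds]; simp))
        rw [hdrop, hds]
        have haf : (a == '/') = false := by simp [ha]
        simp only [List.cons_append, haf, Bool.and_false]
        simp [h32]

-- the regex scan, started at \A, produces A's join of the normalized segments
theorem pv_main (n : Nat) : ∀ (l : List Char), l.length ≤ n →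
    pvReSub true l = PySem.Chars.join ['/'] ((pvPieces l).map pvNorm) := by
  induction n with
  | zero =>
    intro l hl
    have : l = [] := by cases l <;> simp_all
    subst this
    rw [pvReSub, pvPieces_nil]
    simp [PySem.Chars.join_singleton, pvNorm]
  | succ n ih =>
    intro l hl
    have hseg : ∀ c ∈ l.takeWhile (· ≠ '/'), c ≠ '/' := by
      intro c hc
      have := List.mem_takeWhile_imp hc
      simpa using this
    rcases hdw : l.dropWhile (· ≠ '/') with _ | ⟨a, r⟩
    · -- no '/' in l : a single segment
      have hl_seg : ∀ c ∈ l, c ≠ '/' := by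
        have h0 := List.dropWhile_eq_nil_iff.mp hdw
        intro c hc
        simpa using h0 c hc
      rw [pvPieces_of_dropWhile_nil l hdw]
      simp only [List.map_cons, List.map_nil, PySem.Chars.join_singleton]
      have hmatch : pvMatchHere l = (l.length == 32 && l.all pvHexLower) := by
        have := pv_match_iff l [] hl_seg (Or.inl rfl)
        simpa using this
      unfold pvNorm
      by_cases hhex : (l.length == 32 && l.all pvHexLower) = true
      · rw [if_pos hhex]
        rcases l with _ | ⟨c, rest⟩
        · simp at hhex
        · rw [pvReSub_true_match (c :: rest) (by simp) (by rw [hmatch]; exact hhex)]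
          have h32 : (c :: rest).length = 32 := by
            have h1 := ((Bool.and_eq_true _ _).mp hhex).1
            simpa using h1
          rw [List.drop_eq_nil_of_le (le_of_eq h32), pvReSub]
          rfl
      · rw [if_neg hhex]
        rcases l with _ | ⟨c, rest⟩
        · rw [pvReSub]
        · rw [pvReSub_true_nomatch c rest (by rw [hmatch]; exact Bool.eq_false_iff.mpr hhex)]
          have hc : c ≠ '/' := hl_seg c (by simp)
          rw [show (c == '/') = false by simp [hc]]
          have hcopy := pv_copy rest (fun x hx => hl_seg x (by simp [hx])) []
          simp only [List.append_nil] at hcopy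
          rw [hcopy, pvReSub]
          simp
    · -- l = seg ++ '/' :: r
      obtain rfl : a = '/' := pv_dropWhile_head l r a hdw
      have hsplit : l.takeWhile (· ≠ '/') ++ '/' :: r = l := by
        conv_rhs => rw [← List.takeWhile_append_dropWhile (p := (· ≠ '/')) (l := l)]
        rw [hdw]
      have hpc := pvPieces_of_dropWhile_cons l r '/' hdw
      generalize hsg : l.takeWhile (· ≠ '/') = seg at hsplit hseg hpc
      subst hsplit
      have hr : r.length ≤ n := by simp at hl; omega
      rw [hpc]
      have hjoin : PySem.Chars.join ['/'] ((pvNorm seg :: (pvPieces r).map pvNorm))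
          = pvNorm seg ++ '/' :: PySem.Chars.join ['/'] ((pvPieces r).map pvNorm) := by
        rcases hq : pvPieces r with _ | ⟨q, qs⟩
        · exact absurd hq (pvPieces_ne_nil r)
        · rw [List.map_cons, PySem.Chars.join_cons_cons]
          simp
      rw [List.map_cons, hjoin, ← ih r hr]
      have hmatch : pvMatchHere (seg ++ '/' :: r) = (seg.length == 32 && seg.all pvHexLower) :=
        pv_match_iff seg ('/' :: r) hseg (Or.inr ⟨r, rfl⟩)
      rw [pvNorm]
      by_cases hhex : (seg.length == 32 && seg.all pvHexLower) = true
      · rw [if_pos hhex]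
        have h32 : seg.length = 32 := by simp at hhex; omega
        have hld : (seg ++ '/' :: r).drop 32 = '/' :: r := by
          rw [← h32, List.drop_left]
        rw [pvReSub_true_match (seg ++ '/' :: r) (by simp) (by rw [hmatch]; exact hhex),
            hld, pvReSub_false_cons]
        simp
      · rw [if_neg hhex]
        have hmf : pvMatchHere (seg ++ '/' :: r) = false := by
          rw [hmatch]; exact Bool.eq_false_iff.mpr hhex
        rcases seg with _ | ⟨s0, seg'⟩
        · -- empty first segment
          rw [List.nil_append] at hmf ⊢
          rw [pvReSub_true_nomatch '/' r hmf]
          simp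
        · have hs0 : s0 ≠ '/' := hseg s0 (by simp)
          rw [List.cons_append] at hmf ⊢
          rw [pvReSub_true_nomatch s0 (seg' ++ '/' :: r) hmf,
              show (s0 == '/') = false by simp [hs0],
              pv_copy seg' (fun x hx => hseg x (by simp [hx])) ('/' :: r),
              pvReSub_false_cons]
          simp

-- ===== VERDICT (by name: the statement is the Claim_ definition above) =====
theorem normalize_path_py_spec : Claim_equal_normalize_path_py := by
  intro path _
  unfold Spec_normalize_path_py normalize_path_py normalize_path_py_alt
  rw [pv_splitOn_eq_pieces, pv_main path.toList.length path.toList le_rfl]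
  congr 2
  apply List.map_congr_left
  intro p _
  simp only [pv_hexchar, PySem.Chars.len_eq, pvNorm]
  have hcast : (((p.length : Int)) == 32) = (p.length == 32) := by
    rw [Bool.eq_iff_iff, beq_iff_eq, beq_iff_eq]
    omega
  rw [hcast]
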